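-- pv_equiv track=rewrite | github.com/Imaddindepf/tradeul | services/dilution-tracker/services/extraction/contextual_extractor.py | _select_key_filings
-- ===== SOURCE A (Python) =====
-- from typing import Dict, List, Optional, Tuple, Any
--
-- def _select_key_filings(chain_filings: List[Dict]) -> List[Dict]:
--     """Selecciona los filings más importantes de una cadena"""
--     # OJO: 424B* se trata como TRANSACCIÓN (filingID/accessionNo), no como parte del REGISTRO.
--     # Para el registro priorizamos: EFFECT/amendments y el form principal (S-1/F-1/S-3/F-3).
--     key_forms_priority1 = ['EFFECT', 'S-3/A', 'F-3/A', 'S-1/A', 'F-1/A']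
--     key_forms_priority2 = ['S-3', 'F-3', 'S-1', 'F-1']
--
--     key_filings = []
--
--     # Buscar por prioridad
--     for priority_forms in [key_forms_priority1, key_forms_priority2]:
--         for f in chain_filings:
--             form = (f.get('formType') or '').upper()
--             if any(k in form for k in priority_forms) and f not in key_filings:
--                 key_filings.append(f)
--
--     if not key_filings:
--         # Si no encontramos nada, tomar los más recientes
--         key_filings = chain_filings[-2:] if len(chain_filings) > 1 else chain_filings
--
--     # v4.1: Limitar a 3 filings por cadena (balance entre contexto y velocidad)
--     # Con timeout de 120s configurado en el cliente, podemos procesar más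
--     return key_filings[:3]
-- ===== SOURCE B (Python) =====
-- def _select_key_filings(chain_filings):
--     """Rank-and-stable-sort decomposition: each filing gets a rank once
--     (1 = EFFECT/amendments, 2 = base registration form, 0 = not a key form);
--     the ranked filings are deduplicated in one pass and then stably sorted
--     by rank, which puts all rank-1 filings before rank-2 ones in original order."""
--     key_forms_priority1 = ['EFFECT', 'S-3/A', 'F-3/A', 'S-1/A', 'F-1/A']
--     key_forms_priority2 = ['S-3', 'F-3', 'S-1', 'F-1']
--
--     def rank(f):
--         form = (f.get('formType') or '').upper()
--         if any(k in form for k in key_forms_priority1):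
--             return 1
--         if any(k in form for k in key_forms_priority2):
--             return 2
--         return 0
--
--     picked = []
--     for f in chain_filings:
--         if rank(f) and f not in picked:
--             picked.append(f)
--
--     key_filings = sorted(picked, key=rank)
--
--     if not key_filings:
--         key_filings = chain_filings[-2:] if len(chain_filings) > 1 else chain_filings
--     return key_filings[:3]
-- ===== Notes on version B (the rewrite author's own statement) =====
-- stated objective: alternative
-- what changed: B replaces A's two sequential keyword passes with membership checks against a combined accumulator by a rank function computed once per filing, a single deduplicating selection pass, and a stable sort by rank that orders rank-1 filings before rank-2 ones.
import Mathlib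
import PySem

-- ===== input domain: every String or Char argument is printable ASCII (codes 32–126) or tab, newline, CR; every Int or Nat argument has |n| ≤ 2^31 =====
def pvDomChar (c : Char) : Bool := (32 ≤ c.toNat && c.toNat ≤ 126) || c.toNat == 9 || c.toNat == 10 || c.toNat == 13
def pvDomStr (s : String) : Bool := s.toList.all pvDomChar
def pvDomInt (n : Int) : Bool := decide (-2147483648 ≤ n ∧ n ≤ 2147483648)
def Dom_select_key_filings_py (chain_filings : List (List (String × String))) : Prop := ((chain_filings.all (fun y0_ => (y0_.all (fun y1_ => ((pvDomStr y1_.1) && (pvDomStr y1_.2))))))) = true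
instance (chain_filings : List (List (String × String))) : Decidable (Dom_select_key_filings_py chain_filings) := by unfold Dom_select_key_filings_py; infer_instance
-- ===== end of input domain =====

-- B replaces A's two keyword passes by a per-filing rank, one deduplicating selection pass and a stable sort by rank (alternative decomposition, same cost).
-- Python list-of-dicts membership ('f not in picked') uses dict ==; ported exactly (for first-match assoc lists) by pvDictEq below.


-- ===== PORT A =====
-- shared with the B port: both Pythons write the same keyword lists, the same
-- `(f.get('formType') or '').upper()` expression and the same dict-valued `in`/`==` test.
def pvP1 : List String := ["EFFECT", "S-3/A", "F-3/A", "S-1/A", "F-1/A"]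
def pvP2 : List String := ["S-3", "F-3", "S-1", "F-1"]

-- f.get(k) on a dict given as a first-match association list
def pvGet (f : List (String × String)) (k : String) : Option String :=
  (f.find? (fun kv => kv.1 == k)).map Prod.snd

-- (f.get('formType') or '').upper() : the `or ''` turns both None (missing key) and '' into ''
def pvForm (f : List (String × String)) : String :=
  PySem.Str.upper ((pvGet f "formType").getD "")

-- Python dict == (key-set plus per-key value equality, insertion order ignored), exact for
-- first-match association lists; this is the equality `f not in key_filings` applies to dicts.
def pvDictEq (a b : List (String × String)) : Bool :=
  (a ++ b).all (fun kv => pvGet a kv.1 == pvGet b kv.1)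

def select_key_filings_py (chain_filings : List (List (String × String))) : List (List (String × String)) :=
  let key_filings : List (List (String × String)) :=
    [pvP1, pvP2].foldl (fun key_filings priority_forms =>
      chain_filings.foldl (fun key_filings f =>
        let form := pvForm f
        if priority_forms.any (fun k => PySem.Str.isIn k form)
            && !(key_filings.any (fun g => pvDictEq f g)) then
          key_filings ++ [f]
        else key_filings) key_filings) []
  let key_filings :=
    if key_filings.isEmpty then
      (if decide (1 < chain_filings.length) then PySem.List.slice chain_filings (some (-2)) none
       else chain_filings)
    else key_filings
  PySem.List.slice key_filings none (some 3)

-- ===== PORT B =====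
-- rank(f): 1 for a priority-1 form, 2 for a priority-2 form, 0 otherwise
def pvRank (f : List (String × String)) : Int :=
  let form := pvForm f
  if pvP1.any (fun k => PySem.Str.isIn k form) then 1
  else if pvP2.any (fun k => PySem.Str.isIn k form) then 2
  else 0

def select_key_filings_py_alt (chain_filings : List (List (String × String))) : List (List (String × String)) :=
  let picked : List (List (String × String)) :=
    chain_filings.foldl (fun picked f =>
      if (pvRank f != 0) && !(picked.any (fun g => pvDictEq f g)) then picked ++ [f]
      else picked) []
  let key_filings := PySem.List.sorted picked pvRank
  let key_filings :=
    if key_filings.isEmpty then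
      (if decide (1 < chain_filings.length) then PySem.List.slice chain_filings (some (-2)) none
       else chain_filings)
    else key_filings
  PySem.List.slice key_filings none (some 3)

-- ===== PRECONDITION & SPEC =====
def Spec_select_key_filings_py (chain_filings : List (List (String × String))) (out : List (List (String × String))) : Prop := out = select_key_filings_py_alt chain_filings
instance (chain_filings : List (List (String × String))) (out : List (List (String × String))) : Decidable (Spec_select_key_filings_py chain_filings out) := by unfold Spec_select_key_filings_py; infer_instance

-- ===== CLAIM (what is proved, stated in full; the proofs are below) =====
def Claim_equal_select_key_filings_py : Prop := ∀ (chain_filings : List (List (String × String))), Dom_select_key_filings_py chain_filings → Spec_select_key_filings_py chain_filings (select_key_filings_py chain_filings)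

-- ===== LEMMAS AND PROOFS =====

def pvM1 (f : List (String × String)) : Bool := pvP1.any (fun k => PySem.Str.isIn k (pvForm f))
def pvM2 (f : List (String × String)) : Bool := pvP2.any (fun k => PySem.Str.isIn k (pvForm f))

theorem pvRank_eq (f : List (String × String)) :
    pvRank f = if pvM1 f then 1 else if pvM2 f then 2 else 0 := rfl

theorem rank_zero_m {f : List (String × String)} (h : pvRank f = 0) :
    pvM1 f = false ∧ pvM2 f = false := by
  rw [pvRank_eq] at h
  split_ifs at h with h1 h2
  · omega
  · omega
  · simp only [Bool.not_eq_true] at h1 h2; exact ⟨h1, h2⟩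

theorem rank_one_m {f : List (String × String)} (h : pvRank f = 1) : pvM1 f = true := by
  rw [pvRank_eq] at h
  split_ifs at h with h1 h2 <;> first | exact h1 | omega

theorem rank_two_m {f : List (String × String)} (h : pvRank f = 2) :
    pvM1 f = false ∧ pvM2 f = true := by
  rw [pvRank_eq] at h
  split_ifs at h with h1 h2
  · omega
  · simp only [Bool.not_eq_true] at h1; exact ⟨h1, h2⟩
  · omega

theorem pvRank_cases (f : List (String × String)) :
    pvRank f = 0 ∨ pvRank f = 1 ∨ pvRank f = 2 := by
  rw [pvRank_eq]; split_ifs <;> simp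

-- A's inner loop (one keyword pass), with the match test abstracted
def passA (m : List (String × String) → Bool)
    (acc : List (List (String × String))) (xs : List (List (String × String))) :
    List (List (String × String)) :=
  xs.foldl (fun a f => if m f && !(a.any (fun g => pvDictEq f g)) then a ++ [f] else a) acc

-- B's selection loop
def pickStep (acc : List (List (String × String))) (f : List (String × String)) :
    List (List (String × String)) :=
  if (pvRank f != 0) && !(acc.any (fun g => pvDictEq f g)) then acc ++ [f] else acc

-- the pair-of-buckets loop both characterizations are routed through
def stepB (st : List (List (String × String)) × List (List (String × String)))
    (f : List (String × String)) :
    List (List (String × String)) × List (List (String × String)) :=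
  if pvM1 f then
    (if st.1.any (fun g => pvDictEq f g) then st else (st.1 ++ [f], st.2))
  else if pvM2 f then
    (if st.2.any (fun g => pvDictEq f g) then st else (st.1, st.2 ++ [f]))
  else st

def goB (xs : List (List (String × String)))
    (st : List (List (String × String)) × List (List (String × String))) :
    List (List (String × String)) × List (List (String × String)) :=
  xs.foldl stepB st

theorem goB_cons (f : List (String × String)) (rest : List (List (String × String)))
    (st : List (List (String × String)) × List (List (String × String))) :
    goB (f :: rest) st = goB rest (stepB st f) := rfl

theorem passA_cons (m : List (String × String) → Bool) (acc : List (List (String × String)))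
    (f : List (String × String)) (rest : List (List (String × String))) :
    passA m acc (f :: rest)
      = passA m (if m f && !(acc.any (fun g => pvDictEq f g)) then acc ++ [f] else acc) rest := rfl

theorem mem_passA {m : List (String × String) → Bool} {g : List (String × String)}
    {acc xs : List (List (String × String))} (h : g ∈ passA m acc xs) :
    g ∈ acc ∨ m g = true := by
  induction xs generalizing acc with
  | nil => exact Or.inl h
  | cons f rest ih =>
    rw [passA_cons] at h
    rcases ih h with h' | h'
    · by_cases hc : (m f && !(acc.any (fun g => pvDictEq f g))) = true
      · rw [if_pos hc] at h'
        rcases List.mem_append.1 h' with h2 | h2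
        · exact Or.inl h2
        · simp only [List.mem_singleton] at h2
          subst h2
          exact Or.inr (by simp only [Bool.and_eq_true] at hc; exact hc.1)
      · rw [if_neg hc] at h'; exact Or.inl h'
    · exact Or.inr h'

theorem subset_passA {m : List (String × String) → Bool} {g : List (String × String)}
    {acc : List (List (String × String))} (xs : List (List (String × String)))
    (h : g ∈ acc) : g ∈ passA m acc xs := by
  induction xs generalizing acc with
  | nil => exact h
  | cons f rest ih =>
    rw [passA_cons]
    apply ih
    split
    · exact List.mem_append_left _ h
    · exact h

theorem pvDictEq_refl (a : List (String × String)) : pvDictEq a a = true := by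
  unfold pvDictEq
  rw [List.all_eq_true]
  intro kv _
  exact beq_self_eq_true _

theorem pvDictEq_form {a b : List (String × String)} (h : pvDictEq a b = true) :
    pvForm a = pvForm b := by
  have hget : pvGet a "formType" = pvGet b "formType" := by
    unfold pvDictEq at h
    rw [List.all_eq_true] at h
    cases hf : a.find? (fun kv => kv.1 == "formType") with
    | some kv0 =>
      have hmem : kv0 ∈ a := List.mem_of_find?_eq_some hf
      have hkey : (kv0.1 == "formType") = true := by
        have := List.find?_some hf; simpa using this
      have := h kv0 (List.mem_append_left _ hmem)
      rw [eq_of_beq hkey] at this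
      exact eq_of_beq this
    | none =>
      cases hg : b.find? (fun kv => kv.1 == "formType") with
      | some kv0 =>
        have hmem : kv0 ∈ b := List.mem_of_find?_eq_some hg
        have hkey : (kv0.1 == "formType") = true := by
          have := List.find?_some hg; simpa using this
        have := h kv0 (List.mem_append_right _ hmem)
        rw [eq_of_beq hkey] at this
        exact eq_of_beq this
      | none =>
        simp [pvGet, hf, hg]
  unfold pvForm
  rw [hget]

theorem pvM1_congr {a b : List (String × String)} (h : pvDictEq a b = true) :
    pvM1 a = pvM1 b := by unfold pvM1; rw [pvDictEq_form h]

theorem pvRank_congr {a b : List (String × String)} (h : pvDictEq a b = true) :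
    pvRank a = pvRank b := by unfold pvRank; rw [pvDictEq_form h]

-- A's second pass over (first pass ++ twos) equals the bucketing loop, as long as
-- ones holds only rank-1 and twos only rank-2 filings
theorem passA_eq_goB (xs : List (List (String × String)))
    (ones twos : List (List (String × String)))
    (h1 : ∀ g ∈ ones, pvM1 g = true)
    (h2 : ∀ g ∈ twos, pvM1 g = false ∧ pvM2 g = true) :
    passA pvM2 (passA pvM1 ones xs ++ twos) xs
      = (goB xs (ones, twos)).1 ++ (goB xs (ones, twos)).2 := by
  induction xs generalizing ones twos with
  | nil => rfl
  | cons f rest ih =>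
    by_cases hm1 : pvM1 f = true
    · by_cases hmem : ones.any (fun g => pvDictEq f g) = true
      · have hcons1 : passA pvM1 ones (f :: rest) = passA pvM1 ones rest := by
          rw [passA_cons, hmem]; simp
        have hany2 : (passA pvM1 ones rest ++ twos).any (fun g => pvDictEq f g) = true := by
          rcases List.any_eq_true.1 hmem with ⟨g, hg, hfg⟩
          exact List.any_eq_true.2 ⟨g, List.mem_append_left _ (subset_passA rest hg), hfg⟩
        have hgo : goB (f :: rest) (ones, twos) = goB rest (ones, twos) := by
          rw [goB_cons]
          simp [stepB, hm1, hmem]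
        rw [hgo, hcons1, passA_cons, hany2]
        simp only [Bool.not_true, Bool.and_false, Bool.false_eq_true, if_false]
        exact ih ones twos h1 h2
      · have hmem' : ones.any (fun g => pvDictEq f g) = false := Bool.eq_false_iff.2 hmem
        have hcons1 : passA pvM1 ones (f :: rest) = passA pvM1 (ones ++ [f]) rest := by
          rw [passA_cons, hmem', hm1]; simp
        have hany2 : (passA pvM1 (ones ++ [f]) rest ++ twos).any (fun g => pvDictEq f g) = true := by
          refine List.any_eq_true.2 ⟨f, List.mem_append_left _ (subset_passA rest ?_), pvDictEq_refl f⟩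
          exact List.mem_append_right _ (List.mem_singleton.2 rfl)
        have hgo : goB (f :: rest) (ones, twos) = goB rest (ones ++ [f], twos) := by
          rw [goB_cons]
          simp [stepB, hm1, hmem']
        rw [hgo, hcons1, passA_cons, hany2]
        simp only [Bool.not_true, Bool.and_false, Bool.false_eq_true, if_false]
        refine ih (ones ++ [f]) twos ?_ h2
        intro g hg
        rcases List.mem_append.1 hg with hg | hg
        · exact h1 g hg
        · rw [List.mem_singleton.1 hg]; exact hm1
    · have hm1' : pvM1 f = false := Bool.eq_false_iff.2 hm1
      have hcons1 : passA pvM1 ones (f :: rest) = passA pvM1 ones rest := by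
        rw [passA_cons, hm1']; simp
      have hnot1 : (passA pvM1 ones rest).any (fun g => pvDictEq f g) = false := by
        rw [Bool.eq_false_iff]
        intro hany
        rcases List.any_eq_true.1 hany with ⟨g, hg, hfg⟩
        have hg1 : pvM1 g = true := by
          rcases mem_passA hg with h | h
          · exact h1 g h
          · exact h
        rw [pvM1_congr hfg, hg1] at hm1'
        exact Bool.true_eq_false.mp hm1'
      by_cases hm2 : pvM2 f = true
      · by_cases hmem : twos.any (fun g => pvDictEq f g) = true
        · have hany2 : (passA pvM1 ones rest ++ twos).any (fun g => pvDictEq f g) = true := by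
            rcases List.any_eq_true.1 hmem with ⟨g, hg, hfg⟩
            exact List.any_eq_true.2 ⟨g, List.mem_append_right _ hg, hfg⟩
          have hgo : goB (f :: rest) (ones, twos) = goB rest (ones, twos) := by
            rw [goB_cons]
            simp [stepB, hm1', hm2, hmem]
          rw [hgo, hcons1, passA_cons, hany2]
          simp only [Bool.not_true, Bool.and_false, Bool.false_eq_true, if_false]
          exact ih ones twos h1 h2
        · have hmem' : twos.any (fun g => pvDictEq f g) = false := Bool.eq_false_iff.2 hmem
          have hany2 : (passA pvM1 ones rest ++ twos).any (fun g => pvDictEq f g) = false := by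
            rw [List.any_append, hnot1, hmem']; rfl
          have hgo : goB (f :: rest) (ones, twos) = goB rest (ones, twos ++ [f]) := by
            rw [goB_cons]
            simp [stepB, hm1', hm2, hmem']
          rw [hgo, hcons1, passA_cons, hany2, hm2]
          simp only [Bool.not_false, Bool.and_true, if_true, List.append_assoc]
          refine ih ones (twos ++ [f]) h1 ?_
          intro g hg
          rcases List.mem_append.1 hg with hg | hg
          · exact h2 g hg
          · rw [List.mem_singleton.1 hg]; exact ⟨hm1', hm2⟩
      · have hm2' : pvM2 f = false := Bool.eq_false_iff.2 hm2
        have hgo : goB (f :: rest) (ones, twos) = goB rest (ones, twos) := by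
          rw [goB_cons]
          simp [stepB, hm1', hm2']
        rw [hgo, hcons1, passA_cons, hm2']
        simp only [Bool.false_and, Bool.false_eq_true, if_false]
        exact ih ones twos h1 h2

-- B's single selection pass, characterized by the same bucketing loop via filters
theorem pick_eq_goB (xs : List (List (String × String)))
    (acc o t : List (List (String × String)))
    (ho : acc.filter (fun f => pvRank f == 1) = o)
    (ht : acc.filter (fun f => pvRank f == 2) = t)
    (hall : ∀ f ∈ acc, pvRank f = 1 ∨ pvRank f = 2) :
    (xs.foldl pickStep acc).filter (fun f => pvRank f == 1) = (goB xs (o, t)).1 ∧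
    (xs.foldl pickStep acc).filter (fun f => pvRank f == 2) = (goB xs (o, t)).2 ∧
    (∀ f ∈ xs.foldl pickStep acc, pvRank f = 1 ∨ pvRank f = 2) := by
  induction xs generalizing acc o t with
  | nil => exact ⟨ho, ht, hall⟩
  | cons x rest ih =>
    have hsub1 : ∀ g ∈ o, g ∈ acc := by
      intro g hg; rw [← ho] at hg; exact (List.mem_filter.1 hg).1
    have hsub2 : ∀ g ∈ t, g ∈ acc := by
      intro g hg; rw [← ht] at hg; exact (List.mem_filter.1 hg).1
    rcases pvRank_cases x with hr | hr | hr
    · -- rank 0: neither loop touches its state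
      have hm := rank_zero_m hr
      have hp : pickStep acc x = acc := by
        simp [pickStep, hr]
      have hgo : goB (x :: rest) (o, t) = goB rest (o, t) := by
        rw [goB_cons]; simp [stepB, hm.1, hm.2]
      rw [List.foldl_cons, hp, hgo]
      exact ih acc o t ho ht hall
    · -- rank 1
      have hm1 := rank_one_m hr
      by_cases hany : acc.any (fun g => pvDictEq x g) = true
      · have hoany : o.any (fun g => pvDictEq x g) = true := by
          rcases List.any_eq_true.1 hany with ⟨g, hg, hxg⟩
          have hgr : pvRank g = 1 := by rw [← pvRank_congr hxg, hr]
          refine List.any_eq_true.2 ⟨g, ?_, hxg⟩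
          rw [← ho]; exact List.mem_filter.2 ⟨hg, by simp [hgr]⟩
        have hp : pickStep acc x = acc := by
          simp [pickStep, hany]
        have hgo : goB (x :: rest) (o, t) = goB rest (o, t) := by
          rw [goB_cons]; simp [stepB, hm1, hoany]
        rw [List.foldl_cons, hp, hgo]
        exact ih acc o t ho ht hall
      · have hany' : acc.any (fun g => pvDictEq x g) = false := Bool.eq_false_iff.2 hany
        have hoany : o.any (fun g => pvDictEq x g) = false := by
          rw [Bool.eq_false_iff]
          intro h
          rcases List.any_eq_true.1 h with ⟨g, hg, hxg⟩
          rw [Bool.eq_false_iff] at hany'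
          exact hany' (List.any_eq_true.2 ⟨g, hsub1 g hg, hxg⟩)
        have hp : pickStep acc x = acc ++ [x] := by
          simp [pickStep, hany', hr]
        have hgo : goB (x :: rest) (o, t) = goB rest (o ++ [x], t) := by
          rw [goB_cons]; simp [stepB, hm1, hoany]
        rw [List.foldl_cons, hp, hgo]
        refine ih (acc ++ [x]) (o ++ [x]) t ?_ ?_ ?_
        · rw [List.filter_append, ho]; simp [hr]
        · rw [List.filter_append, ht]; simp [hr]
        · intro f hf
          rcases List.mem_append.1 hf with hf | hf
          · exact hall f hf
          · rw [List.mem_singleton.1 hf]; exact Or.inl hr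
    · -- rank 2
      have hm2 := rank_two_m hr
      by_cases hany : acc.any (fun g => pvDictEq x g) = true
      · have htany : t.any (fun g => pvDictEq x g) = true := by
          rcases List.any_eq_true.1 hany with ⟨g, hg, hxg⟩
          have hgr : pvRank g = 2 := by rw [← pvRank_congr hxg, hr]
          refine List.any_eq_true.2 ⟨g, ?_, hxg⟩
          rw [← ht]; exact List.mem_filter.2 ⟨hg, by simp [hgr]⟩
        have hp : pickStep acc x = acc := by
          simp [pickStep, hany]
        have hgo : goB (x :: rest) (o, t) = goB rest (o, t) := by
          rw [goB_cons]; simp [stepB, hm2.1, hm2.2, htany]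
        rw [List.foldl_cons, hp, hgo]
        exact ih acc o t ho ht hall
      · have hany' : acc.any (fun g => pvDictEq x g) = false := Bool.eq_false_iff.2 hany
        have htany : t.any (fun g => pvDictEq x g) = false := by
          rw [Bool.eq_false_iff]
          intro h
          rcases List.any_eq_true.1 h with ⟨g, hg, hxg⟩
          rw [Bool.eq_false_iff] at hany'
          exact hany' (List.any_eq_true.2 ⟨g, hsub2 g hg, hxg⟩)
        have hp : pickStep acc x = acc ++ [x] := by
          simp [pickStep, hany', hr]
        have hgo : goB (x :: rest) (o, t) = goB rest (o, t ++ [x]) := by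
          rw [goB_cons]; simp [stepB, hm2.1, hm2.2, htany]
        rw [List.foldl_cons, hp, hgo]
        refine ih (acc ++ [x]) o (t ++ [x]) ?_ ?_ ?_
        · rw [List.filter_append, ho]; simp [hr]
        · rw [List.filter_append, ht]; simp [hr]
        · intro f hf
          rcases List.mem_append.1 hf with hf | hf
          · exact hall f hf
          · rw [List.mem_singleton.1 hf]; exact Or.inr hr

-- insertion-sort step lemmas
theorem insertBy_cons {α : Type} (before : α → α → Bool) (x y : α) (ys : List α) :
    PySem.List.insertBy before x (y :: ys)
      = if before x y then x :: y :: ys else y :: PySem.List.insertBy before x ys := rfl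

theorem insertBy_skip {α : Type} (before : α → α → Bool) (x : α) (f1 ys : List α)
    (h : ∀ y ∈ f1, before x y = false) :
    PySem.List.insertBy before x (f1 ++ ys) = f1 ++ PySem.List.insertBy before x ys := by
  induction f1 with
  | nil => rfl
  | cons y t ih =>
    rw [List.cons_append, insertBy_cons, h y (List.mem_cons_self), ih (fun z hz => h z (List.mem_cons_of_mem _ hz))]
    simp

-- the stable sort by a {1,2}-valued rank is exactly "rank-1 filings, then rank-2 filings"
theorem foldlIns_eq (l f1 f2 : List (List (String × String)))
    (hl : ∀ f ∈ l, pvRank f = 1 ∨ pvRank f = 2)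
    (h1 : ∀ f ∈ f1, pvRank f = 1) (h2 : ∀ f ∈ f2, pvRank f = 2) :
    l.foldl (fun acc x => PySem.List.insertBy (fun a b => decide (pvRank a < pvRank b)) x acc) (f1 ++ f2)
      = (f1 ++ l.filter (fun f => pvRank f == 1)) ++ (f2 ++ l.filter (fun f => pvRank f == 2)) := by
  induction l generalizing f1 f2 with
  | nil => simp
  | cons x rest ih =>
    have hrest : ∀ f ∈ rest, pvRank f = 1 ∨ pvRank f = 2 :=
      fun f hf => hl f (List.mem_cons_of_mem _ hf)
    rcases hl x List.mem_cons_self with hr | hr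
    · have hskip : ∀ y ∈ f1, (fun a b => decide (pvRank a < pvRank b)) x y = false := by
        intro y hy
        simp [hr, h1 y hy]
      have hins : PySem.List.insertBy (fun a b => decide (pvRank a < pvRank b)) x (f1 ++ f2)
          = (f1 ++ [x]) ++ f2 := by
        rw [insertBy_skip _ _ _ _ hskip]
        cases f2 with
        | nil => simp [PySem.List.insertBy]
        | cons z zs =>
          rw [insertBy_cons]
          have : (decide (pvRank x < pvRank z)) = true := by
            simp [hr, h2 z List.mem_cons_self]
          rw [this]
          simp
      rw [List.foldl_cons, hins,
        ih (f1 ++ [x]) f2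
          hrest
          (by intro f hf
              rcases List.mem_append.1 hf with hf | hf
              · exact h1 f hf
              · rw [List.mem_singleton.1 hf]; exact hr)
          h2]
      simp [hr]
    · have hskip : ∀ y ∈ f1 ++ f2, (fun a b => decide (pvRank a < pvRank b)) x y = false := by
        intro y hy
        rcases List.mem_append.1 hy with hy | hy
        · simp [hr, h1 y hy]
        · simp [hr, h2 y hy]
      have hins : PySem.List.insertBy (fun a b => decide (pvRank a < pvRank b)) x (f1 ++ f2)
          = f1 ++ (f2 ++ [x]) := by
        rw [PySem.List.insertBy_of_forall_not_before _ _ _ hskip]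
        simp
      rw [List.foldl_cons, hins,
        ih f1 (f2 ++ [x])
          hrest
          h1
          (by intro f hf
              rcases List.mem_append.1 hf with hf | hf
              · exact h2 f hf
              · rw [List.mem_singleton.1 hf]; exact hr)]
      simp [hr]

-- ===== VERDICT (by name: the statement is the Claim_ definition above) =====
theorem select_key_filings_py_spec : Claim_equal_select_key_filings_py := by
  intro chain_filings _
  unfold Spec_select_key_filings_py
  have hA : select_key_filings_py chain_filings =
      (let key := passA pvM2 (passA pvM1 [] chain_filings ++ []) chain_filings
       let key := if key.isEmpty then
           (if decide (1 < chain_filings.length) then PySem.List.slice chain_filings (some (-2)) none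
            else chain_filings) else key
       PySem.List.slice key none (some 3)) := by
    simp only [List.append_nil]; rfl
  have hB : select_key_filings_py_alt chain_filings =
      (let key := PySem.List.sorted (chain_filings.foldl pickStep []) pvRank
       let key := if key.isEmpty then
           (if decide (1 < chain_filings.length) then PySem.List.slice chain_filings (some (-2)) none
            else chain_filings) else key
       PySem.List.slice key none (some 3)) := rfl
  obtain ⟨hf1, hf2, hall⟩ :=
    pick_eq_goB chain_filings [] [] [] (by simp) (by simp) (by intro f h; cases h)
  have hsorted : PySem.List.sorted (chain_filings.foldl pickStep []) pvRank
      = (goB chain_filings ([], [])).1 ++ (goB chain_filings ([], [])).2 := by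
    rw [PySem.List.sorted_eq_foldl_insertBy]
    have := foldlIns_eq (chain_filings.foldl pickStep []) [] [] hall
      (by intro f h; cases h) (by intro f h; cases h)
    simp only [List.nil_append] at this
    rw [this, hf1, hf2]
  rw [hA, hB, hsorted,
    passA_eq_goB chain_filings [] [] (by intro g hg; cases hg) (by intro g hg; cases hg)]
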